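-- pv_equiv track=rewrite | github.com/itba-proyecto-final/gym-chase | gym_chase/envs/chase_env.py | get_state_map
-- ===== SOURCE A (Python) =====
-- def get_state_map(num_rows_cols):
--     state_map = dict()
--     state_number = 0
--     for i in range(num_rows_cols):
--         for j in range(num_rows_cols):
--             base_matrix = [['-' for _ in range(num_rows_cols)] for _ in range(num_rows_cols)]
--             base_matrix[i][j] = 'X'
--             state_map[get_matrix_string(base_matrix)] = state_number
--             state_number += 1
--     return state_map
--
-- def get_matrix_string(matrix):
--     matrix_string = ""
--     for i in range(len(matrix)):
--         for j in range(len(matrix)):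
--             if matrix[i][j] == "G":
--                 matrix_string += "-,"
--             else:
--                 matrix_string += matrix[i][j] + ","
--     return matrix_string
-- ===== SOURCE B (Python) =====
-- def get_state_map(num_rows_cols):
--     n = max(num_rows_cols, 0)
--     n2 = n * n
--     return {'-,' * k + 'X,' + '-,' * (n2 - 1 - k): k for k in range(n2)}
-- ===== Notes on version B (the rewrite author's own statement) =====
-- stated objective: simpler
-- what changed: B drops the n×n matrix entirely: instead of building a fresh matrix per state, placing 'X', and re-scanning it cell by cell to build the key, B constructs each key in closed form as '-,'*k + 'X,' + '-,'*(n²-1-k) from the flat index k in one dict comprehension.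
import Mathlib
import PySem

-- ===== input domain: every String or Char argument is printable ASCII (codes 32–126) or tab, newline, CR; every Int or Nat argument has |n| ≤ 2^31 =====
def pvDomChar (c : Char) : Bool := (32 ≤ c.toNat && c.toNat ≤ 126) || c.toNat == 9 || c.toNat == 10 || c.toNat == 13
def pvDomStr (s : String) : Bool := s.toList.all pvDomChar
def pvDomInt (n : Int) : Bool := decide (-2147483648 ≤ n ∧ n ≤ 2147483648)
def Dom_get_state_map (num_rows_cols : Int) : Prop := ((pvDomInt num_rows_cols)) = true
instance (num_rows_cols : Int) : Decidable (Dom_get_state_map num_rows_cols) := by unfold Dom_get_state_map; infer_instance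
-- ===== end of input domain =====

-- B replaces A's per-state n×n matrix build-and-rescan by the closed-form string
-- '-,'*k + 'X,' + '-,'*(n²-1-k) for each flat index k; same return value, simpler code.

-- ===== PORT A =====
-- strings are built as char lists and wrapped with String.ofList (exact: Python
-- string concatenation is append on the code-point list)
def get_matrix_string (matrix : List (List String)) : String :=
  String.ofList
    ((PySem.List.pyRange 0 (PySem.List.len matrix) 1).foldl (fun ms i =>
      (PySem.List.pyRange 0 (PySem.List.len matrix) 1).foldl (fun ms j =>
        let c := PySem.List.pyGetD (PySem.List.pyGetD matrix i []) j ""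
        if c == "G" then ms ++ ['-', ','] else ms ++ c.toList ++ [',']) ms) [])

-- base_matrix[i][j] = 'X' is ported with List.set at i.toNat/j.toNat: exact here,
-- since i and j come from range(num_rows_cols), so they are nonnegative and in range
def get_state_map (num_rows_cols : Int) : List (String × Int) :=
  ((PySem.List.pyRange 0 num_rows_cols 1).foldl
    (fun (st : PySem.Dict String Int × Int) i =>
      (PySem.List.pyRange 0 num_rows_cols 1).foldl
        (fun st j =>
          let base := (PySem.List.pyRange 0 num_rows_cols 1).map
            (fun _ => (PySem.List.pyRange 0 num_rows_cols 1).map (fun _ => "-"))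
          let base := base.set i.toNat ((PySem.List.pyGetD base i []).set j.toNat "X")
          (st.1.insert (get_matrix_string base) st.2, st.2 + 1))
        st)
    (PySem.Dict.empty, 0)).1.items

-- ===== PORT B =====
def get_state_map_alt (num_rows_cols : Int) : List (String × Int) :=
  let n := max num_rows_cols 0
  let n2 := n * n
  ((PySem.List.pyRange 0 n2 1).foldl
    (fun (d : PySem.Dict String Int) k =>
      d.insert
        (String.ofList (PySem.List.pyRepeat ['-', ','] k ++ ['X', ','] ++
          PySem.List.pyRepeat ['-', ','] (n2 - 1 - k)))
        k)
    PySem.Dict.empty).items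

-- ===== PRECONDITION & SPEC =====
def Spec_get_state_map (num_rows_cols : Int) (out : List (String × Int)) : Prop := out = get_state_map_alt num_rows_cols
instance (num_rows_cols : Int) (out : List (String × Int)) : Decidable (Spec_get_state_map num_rows_cols out) := by unfold Spec_get_state_map; infer_instance

-- ===== CLAIM (what is proved, stated in full; the proofs are below) =====
def Claim_equal_get_state_map : Prop := ∀ (num_rows_cols : Int), Dom_get_state_map num_rows_cols → Spec_get_state_map num_rows_cols (get_state_map num_rows_cols)

-- ===== LEMMAS AND PROOFS =====

-- k copies of "-," as a char list
def rep : Nat → List Char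
  | 0 => []
  | k + 1 => '-' :: ',' :: rep k

-- the state string of flat index k on a grid with T = n² cells, as a char list
def keyC (T k : Nat) : List Char := rep k ++ 'X' :: ',' :: rep (T - 1 - k)

def Kstr (T k : Nat) : String := String.ofList (keyC T k)

-- the common canonical result: first t items of the state map for a T-cell grid
def canonItems (T t : Nat) : List (String × Int) :=
  (List.range t).map (fun k => (Kstr T k, (k : Int)))

theorem rep_add (a b : Nat) : rep (a + b) = rep a ++ rep b := by
  induction a with
  | zero => simp [rep]
  | succ a ih => rw [Nat.succ_add]; simp [rep, ih]

theorem length_rep (k : Nat) : (rep k).length = 2 * k := by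
  induction k with
  | zero => simp [rep]
  | succ k ih => simp [rep, ih]; omega

theorem X_not_mem_rep (k : Nat) : 'X' ∉ rep k := by
  induction k with
  | zero => simp [rep]
  | succ k ih => simp [rep]; exact ih

theorem rep_X_ne {k k' : Nat} (h : k < k') (l l' : List Char) :
    rep k ++ 'X' :: l ≠ rep k' ++ 'X' :: l' := by
  intro he
  have h2k : (rep k ++ 'X' :: l)[(2*k)]? = some 'X' := by
    rw [List.getElem?_append_right (by simp [length_rep])]
    simp [length_rep]
  rw [he] at h2k
  have hlt : 2 * k < (rep k').length := by rw [length_rep]; omega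
  rw [List.getElem?_append_left hlt] at h2k
  exact X_not_mem_rep k' (List.mem_of_getElem? h2k)

theorem Kstr_inj {T k k' : Nat} (h : Kstr T k = Kstr T k') :
    k = k' := by
  have h' : keyC T k = keyC T k' := by
    simpa [Kstr] using congrArg String.toList h
  by_contra hne
  rcases Nat.lt_or_ge k k' with hlt | hge
  · exact rep_X_ne hlt _ _ h'
  · exact rep_X_ne (by omega) _ _ h'.symm

theorem pyRepeat_eq_rep (z : Int) : PySem.List.pyRepeat ['-', ','] z = rep z.toNat := by
  show (List.replicate z.toNat ['-', ',']).flatten = rep z.toNat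
  induction z.toNat with
  | zero => simp [rep]
  | succ m ih => simp [List.replicate_succ, rep, ih]

-- contribution of one row to get_matrix_string, as a char list
def rowStr (row : List String) : List Char := row.flatMap (fun c => c.toList ++ [','])

theorem rowStr_replicate (m : Nat) : rowStr (List.replicate m "-") = rep m := by
  induction m with
  | zero => simp [rowStr, rep]
  | succ m ih => simp [rowStr, List.replicate_succ, rep] at *; simpa [rowStr] using ih

theorem flatMap_rowStr_replicate (a N : Nat) :
    (List.replicate a (List.replicate N "-")).flatMap rowStr = rep (a * N) := by
  induction a with
  | zero => simp [rep]
  | succ a ih =>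
    rw [List.replicate_succ, List.flatMap_cons, ih, rowStr_replicate,
      Nat.succ_mul, Nat.add_comm (a*N) N, rep_add]

-- A's string builder on a square, G-free matrix is the row-wise flattening
theorem gms_flat (matrix : List (List String))
    (hlen : ∀ row ∈ matrix, row.length = matrix.length)
    (hG : ∀ row ∈ matrix, ∀ c ∈ row, c ≠ "G") :
    get_matrix_string matrix = String.ofList (matrix.flatMap rowStr) := by
  unfold get_matrix_string
  congr 1
  rw [PySem.List.foldl_pyRange_zero_pyGetD matrix []
      (fun ms row => (PySem.List.pyRange 0 (PySem.List.len matrix) 1).foldl (fun ms j =>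
        let c := PySem.List.pyGetD row j ""
        if c == "G" then ms ++ ['-', ','] else ms ++ c.toList ++ [',']) ms) []]
  rw [PySem.List.foldl_congr_mem' matrix _ (fun ms row => ms ++ rowStr row) [] ?_]
  · rw [PySem.List.foldl_append_eq_flatMap]; simp
  · intro row hrow ms
    have hl : PySem.List.len matrix = PySem.List.len row := by
      simp [PySem.List.len_eq, hlen row hrow]
    simp only [hl]
    rw [PySem.List.foldl_pyRange_zero_pyGetD row ""
        (fun ms c => if c == "G" then ms ++ ['-', ','] else ms ++ c.toList ++ [',']) ms]
    rw [PySem.List.foldl_congr_mem' row _ (fun ms c => ms ++ (c.toList ++ [','])) ms ?_]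
    · rw [PySem.List.foldl_append_eq_flatMap]; rfl
    · intro c hc ms'
      have : ¬ (c == "G") = true := by simpa using hG row hrow c hc
      simp [this]

theorem tail_count {N i j : Nat} (hi : i < N) (hj : j < N) :
    N - 1 - j + (N - 1 - i) * N = N * N - 1 - (i * N + j) := by
  have h1 : (N - 1 - i) * N = (N - 1) * N - i * N := by rw [Nat.sub_mul]
  have h2 : (N - 1) * N = N * N - N := by rw [Nat.sub_mul, one_mul]
  have h3 : (i + 1) * N ≤ N * N := Nat.mul_le_mul_right N hi
  rw [Nat.succ_mul] at h3
  omega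

theorem set_replicate {α : Type} (a b : α) {j N : Nat} (h : j < N) :
    (List.replicate N a).set j b = List.replicate j a ++ b :: List.replicate (N - 1 - j) a := by
  rw [List.set_eq_take_append_cons_drop]
  simp [h, List.take_replicate, List.drop_replicate, Nat.min_eq_left (Nat.le_of_lt h)]
  omega

-- the matrix A builds for cell (i, j) has the closed-form key string of flat index i*N+j
theorem gms_base {N i j : Nat} (hi : i < N) (hj : j < N) :
    get_matrix_string
      ((List.replicate N (List.replicate N "-")).set i ((List.replicate N "-").set j "X"))
      = Kstr (N * N) (i * N + j) := by
  rw [set_replicate _ _ hj, set_replicate _ _ hi]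
  rw [gms_flat]
  · congr 1
    rw [List.flatMap_append, List.flatMap_cons, flatMap_rowStr_replicate,
      flatMap_rowStr_replicate]
    show rep (i*N) ++ (rowStr _ ++ rep ((N-1-i)*N)) = keyC (N*N) (i*N+j)
    rw [show rowStr (List.replicate j "-" ++ "X" :: List.replicate (N - 1 - j) "-")
        = rep j ++ 'X' :: ',' :: rep (N-1-j) from ?_]
    · simp only [keyC, List.append_assoc, List.cons_append]
      rw [← rep_add, ← List.append_assoc, ← rep_add, tail_count hi hj]
    · unfold rowStr
      rw [List.flatMap_append, List.flatMap_cons]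
      rw [← rowStr_replicate j, ← rowStr_replicate (N-1-j)]
      rfl
  · intro row hrow
    simp only [List.length_append, List.length_replicate, List.length_cons]
    have : row.length = N := by
      rcases List.mem_append.mp hrow with h | h
      · rw [List.eq_of_mem_replicate h]; simp
      · rcases List.mem_cons.mp h with h | h
        · subst h; simp; omega
        · rw [List.eq_of_mem_replicate h]; simp
    rw [this]; omega
  · intro row hrow c hc
    have hcv : c = "-" ∨ c = "X" := by
      rcases List.mem_append.mp hrow with h | h
      · rw [List.eq_of_mem_replicate h] at hc; exact Or.inl (List.eq_of_mem_replicate hc)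
      · rcases List.mem_cons.mp h with h | h
        · subst h
          rcases List.mem_append.mp hc with h | h
          · exact Or.inl (List.eq_of_mem_replicate h)
          · rcases List.mem_cons.mp h with h | h
            · exact Or.inr h
            · exact Or.inl (List.eq_of_mem_replicate h)
        · rw [List.eq_of_mem_replicate h] at hc; exact Or.inl (List.eq_of_mem_replicate hc)
    rcases hcv with h | h <;> simp [h]

theorem not_contains_canon {T t k : Nat} (ht : t ≤ k) :
    (PySem.Dict.mk (canonItems T t)).contains (Kstr T k) = false := by
  rw [PySem.Dict.contains_eq_decide_mem_keys]
  simp only [PySem.Dict.keys_mk, canonItems, List.map_map, decide_eq_false_iff_not]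
  intro hmem
  obtain ⟨k', hk', he⟩ := List.mem_map.mp hmem
  have hk't : k' < t := List.mem_range.mp hk'
  have he' : Kstr T k' = Kstr T k := by simpa using he
  have : k' = k := Kstr_inj he'
  omega

-- one pass of A's inner loop, with generalized bound m and counter base c
theorem inner_fold (T c : Nat) (m : Nat) (hcm : c + m ≤ T) :
    (PySem.List.pyRange 0 (m : Int) 1).foldl
      (fun (st : PySem.Dict String Int × Int) (j : Int) =>
        (st.1.insert (Kstr T (c + j.toNat)) st.2, st.2 + 1))
      (PySem.Dict.mk (canonItems T c), (c : Int))
      = (PySem.Dict.mk (canonItems T (c + m)), ((c + m : Nat) : Int)) := by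
  induction m with
  | zero => simp [PySem.List.pyRange_one_eq_nil]
  | succ m ih =>
    have hm : ((m : Int) + 1) = ((m + 1 : Nat) : Int) := by push_cast; ring
    rw [← hm, PySem.List.pyRange_one_succ_right (by positivity), List.foldl_append,
      ih (by omega)]
    simp only [List.foldl_cons, List.foldl_nil, Int.toNat_natCast]
    have hnc := not_contains_canon (T := T) (t := c + m) (k := c + m) (by omega)
    have : (PySem.Dict.mk (canonItems T (c + m))).insert (Kstr T (c + m)) ((c + m : Nat) : Int)
        = PySem.Dict.mk (canonItems T (c + m + 1)) := by
      apply PySem.Dict.ext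
      rw [PySem.Dict.items_insert_of_not_contains _ _ hnc]
      show canonItems T (c+m) ++ _ = canonItems T (c+m+1)
      simp [canonItems, List.range_succ]
    rw [this]
    simp only [Prod.mk.injEq]
    exact ⟨rfl, by push_cast; ring⟩

-- A's outer loop: after m rows the dict holds the first m*N canonical items
theorem outer_fold (N : Nat) (m : Nat) (hm : m ≤ N) :
    (PySem.List.pyRange 0 (m : Int) 1).foldl
      (fun (st : PySem.Dict String Int × Int) (i : Int) =>
        (PySem.List.pyRange 0 (N : Int) 1).foldl
          (fun st (j : Int) =>
            (st.1.insert (Kstr (N * N) (i.toNat * N + j.toNat)) st.2, st.2 + 1))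
          st)
      (PySem.Dict.mk (canonItems (N * N) 0), ((0 : Nat) : Int))
      = (PySem.Dict.mk (canonItems (N * N) (m * N)), ((m * N : Nat) : Int)) := by
  induction m with
  | zero => simp [PySem.List.pyRange_one_eq_nil]
  | succ m ih =>
    have hm' : ((m : Int) + 1) = ((m + 1 : Nat) : Int) := by push_cast; ring
    rw [← hm', PySem.List.pyRange_one_succ_right (by positivity), List.foldl_append,
      ih (by omega)]
    simp only [List.foldl_cons, List.foldl_nil, Int.toNat_natCast]
    have hcm : m * N + N ≤ N * N := by
      have := Nat.mul_le_mul_right N hm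
      rw [Nat.succ_mul] at this
      exact this
    rw [inner_fold (N * N) (m * N) N hcm]
    rw [show m * N + N = (m + 1) * N from (Nat.succ_mul m N).symm]

theorem b_side (N : Nat) :
    get_state_map_alt (N : Int) = canonItems (N * N) (N * N) := by
  unfold get_state_map_alt
  have hmax : max (N : Int) 0 = (N : Int) := by omega
  simp only [hmax]
  have hT : (N : Int) * (N : Int) = ((N * N : Nat) : Int) := by push_cast; ring
  rw [hT]
  rw [PySem.List.foldl_congr_mem' _ _
    (fun (d : PySem.Dict String Int) k => d.insert (Kstr (N*N) k.toNat) k) _ ?_]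
  · rw [PySem.Dict.items_foldl_insert_fresh _ _ (fun k => k) _ ?_ ?_]
    · rw [PySem.List.pyRange_zero_natCast, List.map_map]
      simp [canonItems, Function.comp, PySem.Dict.empty]
    · intro a _; exact PySem.Dict.contains_empty _
    · rw [PySem.List.pyRange_zero_natCast, List.map_map]
      apply List.Nodup.map_on ?_ (List.nodup_range)
      intro x hx y hy h
      simp only [Function.comp] at h
      exact Kstr_inj (by simpa using h)
  · intro k hk d
    obtain ⟨hk0, hkT⟩ := PySem.List.mem_pyRange_one.mp hk
    congr 1
    show String.ofList _ = Kstr (N*N) k.toNat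
    rw [pyRepeat_eq_rep, pyRepeat_eq_rep]
    unfold Kstr keyC
    congr 1
    have : (((N * N : Nat) : Int) - 1 - k).toNat = N * N - 1 - k.toNat := by omega
    rw [this]
    simp

theorem a_side (N : Nat) :
    get_state_map (N : Int) = canonItems (N * N) (N * N) := by
  unfold get_state_map
  rw [PySem.List.foldl_congr_mem' _ _
    (fun (st : PySem.Dict String Int × Int) (i : Int) =>
      (PySem.List.pyRange 0 (N : Int) 1).foldl
        (fun st (j : Int) =>
          (st.1.insert (Kstr (N * N) (i.toNat * N + j.toNat)) st.2, st.2 + 1))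
        st) _ ?_]
  · have h0 : (PySem.Dict.empty, (0 : Int)) =
        ((PySem.Dict.mk (canonItems (N*N) 0) : PySem.Dict String Int), ((0 : Nat) : Int)) := rfl
    rw [h0, outer_fold N N le_rfl]
  · intro i hi st
    obtain ⟨hi0, hiN⟩ := PySem.List.mem_pyRange_one.mp hi
    apply PySem.List.foldl_congr_mem'
    intro j hj st'
    obtain ⟨hj0, hjN⟩ := PySem.List.mem_pyRange_one.mp hj
    have hlen : (PySem.List.pyRange 0 (N : Int) 1).length = N := by
      simp [PySem.List.length_pyRange_one]
    have hinner : (PySem.List.pyRange 0 (N : Int) 1).map (fun _ => "-")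
        = List.replicate N "-" := by rw [List.map_const', hlen]
    have hbase : (PySem.List.pyRange 0 (N : Int) 1).map
        (fun _ => (PySem.List.pyRange 0 (N : Int) 1).map (fun _ => "-"))
        = List.replicate N (List.replicate N "-") := by
      rw [hinner, List.map_const', hlen]
    have hiN' : i.toNat < N := by omega
    have hrow : PySem.List.pyGetD (List.replicate N (List.replicate N "-")) i []
        = List.replicate N "-" := by
      rw [PySem.List.pyGetD_of_nonneg _ _ hi0]
      simp [List.getD, hiN']
    show (st'.1.insert (get_matrix_string _) st'.2, st'.2 + 1) = _
    rw [hbase, hrow, gms_base hiN' (by omega : j.toNat < N)]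

-- ===== VERDICT (by name: the statement is the Claim_ definition above) =====
theorem get_state_map_spec : Claim_equal_get_state_map := by
  intro n _
  show get_state_map n = get_state_map_alt n
  rcases Int.lt_or_le n 0 with hneg | hpos
  · have hA : get_state_map n = [] := by
      simp [get_state_map, PySem.List.pyRange_one_eq_nil (Int.le_of_lt hneg)]
      rfl
    have hmax : max n 0 = 0 := by omega
    have hB : get_state_map_alt n = [] := by
      simp [get_state_map_alt, hmax]
      rfl
    rw [hA, hB]
  · obtain ⟨N, rfl⟩ : ∃ N : Nat, n = (N : Int) := ⟨n.toNat, (Int.toNat_of_nonneg hpos).symm⟩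
    rw [a_side, b_side]
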